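-- pv_equiv track=rewrite | github.com/Himanshugahlot248/LFM_GAMMA | agent-core/src/agent_core/ppt_native/service.py | _premium_role_plan
-- ===== SOURCE A (Python) =====
-- _PREMIUM_ROLE_CYCLE = ("context", "insight", "example", "breakdown", "contrast", "data", "emotional")
--
-- def _premium_role_plan(n: int) -> list[str]:
--     """Slide 1 = hook, last = conclusion, interior cycles through roles without consecutive duplicates."""
--     if n <= 0:
--         return []
--     if n == 1:
--         return ["hook"]
--     roles: list[str] = ["hook"]
--     pool = list(_PREMIUM_ROLE_CYCLE)
--     pi = 0
--     for _ in range(n - 2):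
--         picked = None
--         for step in range(len(pool)):
--             cand = pool[(pi + step) % len(pool)]
--             if cand != roles[-1]:
--                 picked = cand
--                 pi = (pi + step + 1) % len(pool)
--                 break
--         roles.append(picked or ("insight" if roles[-1] != "insight" else "example"))
--     roles.append("conclusion")
--     return roles
-- ===== SOURCE B (Python) =====
-- _PREMIUM_ROLE_CYCLE = ("context", "insight", "example", "breakdown", "contrast", "data", "emotional")
--
-- def _premium_role_plan(n: int) -> list[str]:
--     """Slide 1 = hook, last = conclusion, interior cycles through roles without consecutive duplicates."""
--     if n <= 0:
--         return []
--     if n == 1: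
--         return ["hook"]
--     return ["hook"] + [_PREMIUM_ROLE_CYCLE[i % 7] for i in range(n - 2)] + ["conclusion"]
-- ===== Notes on version B (the rewrite author's own statement) =====
-- stated objective: simpler
-- what changed: A's inner candidate search always succeeds at its first candidate (the seven pool roles are pairwise distinct and none is the hook role), so B drops the search-and-fallback machinery and emits the interior slides directly by modulo indexing into the cycle.
import Mathlib
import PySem

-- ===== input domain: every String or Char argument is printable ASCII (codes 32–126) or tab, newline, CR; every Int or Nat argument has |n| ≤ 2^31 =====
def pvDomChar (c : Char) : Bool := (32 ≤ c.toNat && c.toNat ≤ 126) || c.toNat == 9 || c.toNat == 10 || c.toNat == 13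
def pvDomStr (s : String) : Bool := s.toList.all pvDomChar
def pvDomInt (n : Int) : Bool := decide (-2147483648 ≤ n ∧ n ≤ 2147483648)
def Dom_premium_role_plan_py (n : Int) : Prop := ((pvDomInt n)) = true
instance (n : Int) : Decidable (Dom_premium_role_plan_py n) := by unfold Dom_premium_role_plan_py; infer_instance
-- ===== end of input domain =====

-- B replaces A's per-slide candidate search (whose first candidate provably always succeeds) by
-- direct modulo indexing into the role cycle: simpler, same O(n) cost.

-- _PREMIUM_ROLE_CYCLE (module-level constant shared by both implementations)
def pvCycle : List String :=
  ["context", "insight", "example", "breakdown", "contrast", "data", "emotional"]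

-- ===== PORT A =====
-- inner 'for step in range(len(pool))' loop with break; 'none' result = loop fell through
def pvPick (pi : Int) (lastR : String) : List Nat → Option (String × Int)
  | [] => none
  | step :: rest =>
    match PySem.List.pyGet? pvCycle (PySem.Int.mod (pi + (step : Int)) (pvCycle.length : Int)) with
    | none => none   -- unreachable: the index is reduced mod len(pool) > 0, so never an IndexError
    | some cand =>
      if cand ≠ lastR then some (cand, PySem.Int.mod (pi + (step : Int) + 1) (pvCycle.length : Int))
      else pvPick pi lastR rest

-- one iteration of 'for _ in range(n - 2)' over the state (roles, pi)
def pvBody (st : List String × Int) : List String × Int :=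
  let lastR := (PySem.List.pyGet? st.1 (-1)).getD ""   -- roles[-1]; roles is never empty
  match pvPick st.2 lastR (List.range pvCycle.length) with
  | some (c, pi') => (st.1 ++ [c], pi')
  | none => (st.1 ++ [if lastR ≠ "insight" then "insight" else "example"], st.2)

def pvLoopA : Nat → (List String × Int) → (List String × Int)
  | 0, st => st
  | k+1, st => pvLoopA k (pvBody st)

def premium_role_plan_py (n : Int) : List String :=
  if n ≤ 0 then []
  else if n = 1 then ["hook"]
  else (pvLoopA (n - 2).toNat (["hook"], 0)).1 ++ ["conclusion"]

-- ===== PORT B =====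
def premium_role_plan_py_alt (n : Int) : List String :=
  if n ≤ 0 then []
  else if n = 1 then ["hook"]
  else
    "hook" ::
      ((PySem.List.pyRange 0 (n - 2) 1).map
        (fun i => (PySem.List.pyGet? pvCycle (PySem.Int.mod i 7)).getD ""))   -- index always in range
      ++ ["conclusion"]

-- ===== PRECONDITION & SPEC =====
def Spec_premium_role_plan_py (n : Int) (out : List String) : Prop := out = premium_role_plan_py_alt n
instance (n : Int) (out : List String) : Decidable (Spec_premium_role_plan_py n out) := by unfold Spec_premium_role_plan_py; infer_instance

-- ===== CLAIM (what is proved, stated in full; the proofs are below) =====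
def Claim_equal_premium_role_plan_py : Prop := ∀ (n : Int), Dom_premium_role_plan_py n → Spec_premium_role_plan_py n (premium_role_plan_py n)

-- ===== LEMMAS AND PROOFS =====

-- the interior role at position k (0-based), as B computes it
def pvG (k : Nat) : String := pvCycle.getD (k % 7) ""

theorem pvG_ne_of_mod_ne (a b : Nat) (h : a % 7 ≠ b % 7) : pvG a ≠ pvG b := by
  have key : ∀ x y : Fin 7, x ≠ y → pvCycle.getD x.val "" ≠ pvCycle.getD y.val "" := by decide
  have ha : a % 7 < 7 := Nat.mod_lt _ (by omega)
  have hb : b % 7 < 7 := Nat.mod_lt _ (by omega)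
  exact key ⟨a % 7, ha⟩ ⟨b % 7, hb⟩ (by simpa using h)

theorem pvG_ne_hook (a : Nat) : pvG a ≠ "hook" := by
  have key : ∀ x : Fin 7, pvCycle.getD x.val "" ≠ "hook" := by decide
  have ha : a % 7 < 7 := Nat.mod_lt _ (by omega)
  exact key ⟨a % 7, ha⟩

theorem pvPick_first (p : Nat) (lastR : String) (h7 : p < 7)
    (hne : pvCycle.getD p "" ≠ lastR) :
    pvPick ((p : Nat) : Int) lastR (List.range 7) =
      some (pvCycle.getD p "", PySem.Int.mod (((p : Nat) : Int) + 1) 7) := by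
  have hrange : List.range 7 = 0 :: [1, 2, 3, 4, 5, 6] := by decide
  rw [hrange]
  unfold pvPick
  have hcast : ((p : Nat) : Int) + ((0 : Nat) : Int) = (((p + 0 : Nat) : Nat) : Int) := by push_cast; ring
  have hlen : (pvCycle.length : Int) = ((7 : Nat) : Int) := by decide
  rw [hcast, hlen, PySem.Int.mod_natCast]
  have hmod : (p + 0) % 7 = p := by omega
  rw [hmod, PySem.List.pyGet?_natCast]
  have hlt : p < pvCycle.length := by simpa [pvCycle] using h7
  rw [List.getElem?_eq_getElem hlt]
  have hgetD : pvCycle[p] = pvCycle.getD p "" := by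
    simp [List.getD, List.getElem?_eq_getElem hlt]
  rw [hgetD]
  simp only [ne_eq, hne, not_false_eq_true, if_pos]
  norm_num

theorem pvBody_step (j : Nat) :
    pvBody ("hook" :: (List.range j).map pvG, ((j % 7 : Nat) : Int)) =
      ("hook" :: (List.range (j + 1)).map pvG, (((j + 1) % 7 : Nat) : Int)) := by
  have hlast : PySem.List.pyGet? ("hook" :: (List.range j).map pvG) (-1)
      = some (if j = 0 then "hook" else pvG (j - 1)) := by
    rw [PySem.List.pyGet?_neg_one]
    cases j with
    | zero => simp
    | succ j' =>
      rw [List.range_succ, List.map_append]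
      simp only [List.map_cons, List.map_nil, ← List.cons_append, List.getLast?_concat]
      simp
  have hne' : pvCycle.getD (j % 7) "" ≠ (if j = 0 then "hook" else pvG (j - 1)) := by
    cases j with
    | zero => simpa using pvG_ne_hook 0
    | succ j' =>
      simp only [Nat.succ_sub_one, if_neg (Nat.succ_ne_zero j')]
      exact pvG_ne_of_mod_ne (j' + 1) j' (by omega)
  unfold pvBody
  simp only [hlast, Option.getD_some]
  have hlen : pvCycle.length = 7 := by decide
  rw [hlen, pvPick_first (j % 7) _ (Nat.mod_lt _ (by omega)) hne']
  simp only [Prod.mk.injEq]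
  refine ⟨?_, ?_⟩
  · show "hook" :: (List.range j).map pvG ++ [pvCycle.getD (j % 7) ""] = _
    rw [List.range_succ, List.map_append]
    rfl
  · show PySem.Int.mod (((j % 7 : Nat) : Int) + 1) 7 = (((j + 1) % 7 : Nat) : Int)
    have hc : (((j % 7 : Nat) : Int) + 1) = (((j % 7 + 1 : Nat) : Int)) := by push_cast; ring
    have h7 : (7 : Int) = ((7 : Nat) : Int) := by norm_num
    rw [hc, h7, PySem.Int.mod_natCast]
    exact congrArg Nat.cast (by omega)

theorem pvLoop_inv (k : Nat) : ∀ (j : Nat),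
    pvLoopA k ("hook" :: (List.range j).map pvG, ((j % 7 : Nat) : Int)) =
      ("hook" :: (List.range (j + k)).map pvG, (((j + k) % 7 : Nat) : Int)) := by
  induction k with
  | zero => intro j; simp [pvLoopA]
  | succ k' ih =>
    intro j
    show pvLoopA k' (pvBody _) = _
    rw [pvBody_step j, ih (j + 1)]
    have hjk : j + 1 + k' = j + (k' + 1) := by omega
    rw [hjk]

theorem pvB_map (m : Nat) :
    (PySem.List.pyRange 0 (m : Int) 1).map
        (fun i => (PySem.List.pyGet? pvCycle (PySem.Int.mod i 7)).getD "")
      = (List.range m).map pvG := by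
  rw [PySem.List.pyRange_one]
  simp only [sub_zero, Int.toNat_natCast, List.map_map]
  apply List.map_congr_left
  intro k hk
  simp only [Function.comp_apply, zero_add]
  have h7 : (7 : Int) = ((7 : Nat) : Int) := by norm_num
  rw [h7, PySem.Int.mod_natCast, PySem.List.pyGet?_natCast]
  have hlt : k % 7 < pvCycle.length := by
    have : k % 7 < 7 := Nat.mod_lt _ (by omega)
    simpa [pvCycle] using this
  simp [pvG, List.getD, List.getElem?_eq_getElem hlt]

-- ===== VERDICT (by name: the statement is the Claim_ definition above) =====
theorem premium_role_plan_py_spec : Claim_equal_premium_role_plan_py := by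
  intro n _
  show premium_role_plan_py n = premium_role_plan_py_alt n
  unfold premium_role_plan_py premium_role_plan_py_alt
  by_cases h0 : n ≤ 0
  · simp [h0]
  · by_cases h1 : n = 1
    · simp [h1]
    · simp only [h0, h1, if_false]
      have hm : n - 2 = ((n - 2).toNat : Int) := by omega
      conv_rhs => rw [hm]
      rw [pvB_map]
      have := pvLoop_inv (n - 2).toNat 0
      simp only [Nat.zero_mod, Nat.cast_zero, List.range_zero, List.map_nil, zero_add] at this
      rw [this]
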